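-- pv_equiv track=rewrite | github.com/fwilsch/cubicpts | cubicpts/bu.py | points_brute
-- ===== SOURCE A (Python) =====
-- def points_brute(bound, a=1, b=5, c=5, d=5):
--     """Compute points of the equation with 1<= x,y,z <= bound by brute force."""
--     results = []
--     for x in range(1, bound+1):
--         for y in range(1, bound+1):
--             f_xy = a*x*x + b*y*y - 1 # part of f that depends on x and y
--             dxy = d*x*y
--             for z in range(1, bound+1):
--                 if f_xy + c*z*z - dxy*z == 0:
--                     results.append((x, y, z))
--
--     return results
-- ===== SOURCE B (Python) =====
-- def _isqrt(n):
--     """Floor integer square root of n >= 0 (recursive digit-pair method)."""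
--     if n < 2:
--         return n
--     s = _isqrt(n // 4) * 2
--     if (s + 1) * (s + 1) <= n:
--         return s + 1
--     return s
--
--
-- def points_brute(bound, a=1, b=5, c=5, d=5):
--     """Compute points of the equation with 1<= x,y,z <= bound by brute force."""
--     results = []
--     for x in range(1, bound + 1):
--         for y in range(1, bound + 1):
--             f_xy = a*x*x + b*y*y - 1
--             dxy = d*x*y
--             if c == 0:
--                 # linear in z: dxy*z = f_xy
--                 if dxy == 0:
--                     if f_xy == 0:
--                         for z in range(1, bound + 1):
--                             results.append((x, y, z))
--                 elif f_xy % dxy == 0: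
--                     z = f_xy // dxy
--                     if 1 <= z <= bound:
--                         results.append((x, y, z))
--             else:
--                 # quadratic in z: c*z^2 - dxy*z + f_xy = 0
--                 disc = dxy*dxy - 4*c*f_xy
--                 if disc >= 0:
--                     s = _isqrt(disc)
--                     if s*s == disc:
--                         q = 2*c
--                         nums = (dxy - s, dxy + s) if q > 0 else (dxy + s, dxy - s)
--                         last = None
--                         for t in nums:
--                             if t % q == 0:
--                                 z = t // q
--                                 if 1 <= z <= bound and z != last:
--                                     results.append((x, y, z))
--                                     last = z
--     return results
-- ===== Notes on version B (the rewrite author's own statement) =====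
-- stated objective: faster
-- what changed: B drops A's innermost z-loop: for each (x,y) it solves the quadratic c*z^2 - d*x*y*z + (a*x^2+b*y^2-1) = 0 in closed form (integer square root of the discriminant, divisibility and range checks; linear/constant cases when c=0), testing only O(1) candidate roots instead of scanning all z.
import Mathlib
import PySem

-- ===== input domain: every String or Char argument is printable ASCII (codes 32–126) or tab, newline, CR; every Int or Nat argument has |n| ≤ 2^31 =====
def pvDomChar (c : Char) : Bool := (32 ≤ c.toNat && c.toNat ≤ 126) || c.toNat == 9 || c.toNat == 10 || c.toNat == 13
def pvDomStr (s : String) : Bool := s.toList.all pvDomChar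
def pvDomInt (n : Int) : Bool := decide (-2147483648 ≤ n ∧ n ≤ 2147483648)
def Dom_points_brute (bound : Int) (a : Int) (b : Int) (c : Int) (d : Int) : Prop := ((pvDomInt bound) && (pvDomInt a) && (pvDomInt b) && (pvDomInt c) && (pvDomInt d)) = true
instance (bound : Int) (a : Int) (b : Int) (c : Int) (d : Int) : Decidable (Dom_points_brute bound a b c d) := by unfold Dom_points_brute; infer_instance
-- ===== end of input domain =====

-- B replaces A's innermost z-scan by solving the quadratic in z per (x,y), which is asymptotically faster.

-- ===== PORT A =====
def points_brute (bound : Int) (a : Int) (b : Int) (c : Int) (d : Int) : List (Int × Int × Int) :=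
  (PySem.List.pyRange 1 (bound + 1) 1).foldl (fun acc x =>
    (PySem.List.pyRange 1 (bound + 1) 1).foldl (fun acc y =>
      let f_xy := a * x * x + b * y * y - 1
      let dxy := d * x * y
      (PySem.List.pyRange 1 (bound + 1) 1).foldl (fun acc z =>
        if f_xy + c * z * z - dxy * z = 0 then acc ++ [(x, y, z)] else acc) acc) acc) []

-- ===== PORT B =====
-- _isqrt of Source B: floor integer square root (recursive digit-pair method)
def isqrtP (n : Int) : Int :=
  if n < 2 then n
  else
    let s := isqrtP (PySem.Int.floordiv n 4) * 2
    if (s + 1) * (s + 1) ≤ n then s + 1 else s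
termination_by n.toNat
decreasing_by
  have h4 : PySem.Int.floordiv n 4 = n / 4 := PySem.Int.floordiv_eq_ediv_of_pos (by norm_num)
  omega

def points_brute_alt (bound : Int) (a : Int) (b : Int) (c : Int) (d : Int) : List (Int × Int × Int) :=
  (PySem.List.pyRange 1 (bound + 1) 1).foldl (fun acc x =>
    (PySem.List.pyRange 1 (bound + 1) 1).foldl (fun acc y =>
      let f_xy := a * x * x + b * y * y - 1
      let dxy := d * x * y
      if c = 0 then
        -- linear in z: dxy*z = f_xy
        if dxy = 0 then
          if f_xy = 0 then
            (PySem.List.pyRange 1 (bound + 1) 1).foldl (fun acc z => acc ++ [(x, y, z)]) acc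
          else acc
        else if PySem.Int.mod f_xy dxy = 0 then
          let z := PySem.Int.floordiv f_xy dxy
          if 1 ≤ z ∧ z ≤ bound then acc ++ [(x, y, z)] else acc
        else acc
      else
        -- quadratic in z: c*z^2 - dxy*z + f_xy = 0
        let disc := dxy * dxy - 4 * c * f_xy
        if 0 ≤ disc then
          let s := isqrtP disc
          if s * s = disc then
            let q := 2 * c
            ((if 0 < q then [dxy - s, dxy + s] else [dxy + s, dxy - s]).foldl
              (fun st t =>
                if PySem.Int.mod t q = 0 then
                  let z := PySem.Int.floordiv t q
                  if (1 ≤ z ∧ z ≤ bound) ∧ st.2 ≠ some z then (st.1 ++ [(x, y, z)], some z)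
                  else st
                else st) (acc, (none : Option Int))).1
          else acc
        else acc) acc) []

-- ===== PRECONDITION & SPEC =====
def Spec_points_brute (bound : Int) (a : Int) (b : Int) (c : Int) (d : Int) (out : List (Int × Int × Int)) : Prop := out = points_brute_alt bound a b c d
instance (bound : Int) (a : Int) (b : Int) (c : Int) (d : Int) (out : List (Int × Int × Int)) : Decidable (Spec_points_brute bound a b c d out) := by unfold Spec_points_brute; infer_instance

-- ===== CLAIM (what is proved, stated in full; the proofs are below) =====
def Claim_equal_points_brute : Prop := ∀ (bound : Int) (a : Int) (b : Int) (c : Int) (d : Int), Dom_points_brute bound a b c d → Spec_points_brute bound a b c d (points_brute bound a b c d)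

-- ===== LEMMAS AND PROOFS =====

-- floor-sqrt specification of isqrtP, by strong induction following its recursion
lemma isqrtP_spec : ∀ (k : Nat) (n : Int), n.toNat ≤ k → 0 ≤ n →
    0 ≤ isqrtP n ∧ isqrtP n * isqrtP n ≤ n ∧ n < (isqrtP n + 1) * (isqrtP n + 1) := by
  intro k
  induction k with
  | zero =>
    intro n hk hn
    have hn0 : n = 0 := by omega
    subst hn0
    rw [isqrtP]
    norm_num
  | succ k ih =>
    intro n hk hn
    rw [isqrtP]
    by_cases h2 : n < 2
    · rw [if_pos h2]
      refine ⟨hn, by nlinarith, by nlinarith⟩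
    · rw [if_neg h2]
      have h4 : PySem.Int.floordiv n 4 = n / 4 := PySem.Int.floordiv_eq_ediv_of_pos (by norm_num)
      rw [h4]
      have hmn : 0 ≤ n / 4 := by omega
      have hmk : (n / 4).toNat ≤ k := by omega
      obtain ⟨hs0, hs1, hs2⟩ := ih (n / 4) hmk hmn
      have hb1 : 4 * (n / 4) ≤ n := by omega
      have hb2 : n < 4 * (n / 4) + 4 := by omega
      dsimp only
      by_cases hc : (isqrtP (n / 4) * 2 + 1) * (isqrtP (n / 4) * 2 + 1) ≤ n
      · rw [if_pos hc]
        exact ⟨by omega, hc, by nlinarith⟩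
      · rw [if_neg hc]
        exact ⟨by omega, by nlinarith, by omega⟩

-- isqrtP is exact on perfect squares
lemma isqrtP_mul_self (t : Int) : isqrtP (t * t) = |t| := by
  have hnn : 0 ≤ t * t := mul_self_nonneg t
  obtain ⟨h0, h1, h2⟩ := isqrtP_spec (t * t).toNat (t * t) le_rfl hnn
  have habs : 0 ≤ |t| := abs_nonneg t
  have ht2 : |t| * |t| = t * t := abs_mul_abs_self t
  nlinarith [h0, h1, h2, habs, ht2]

-- two pairwise-increasing integer lists with the same members are equal
lemma sorted_ext {L1 L2 : List Int} (h1 : L1.Pairwise (· < ·)) (h2 : L2.Pairwise (· < ·))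
    (hm : ∀ z, z ∈ L1 ↔ z ∈ L2) : L1 = L2 := by
  refine List.eq_of_perm_of_sorted (fun a b _ _ hab hba => absurd hab (not_lt.mpr hba.le)) h1 h2 ?_
  exact List.perm_of_nodup_nodup_toFinset_eq (h1.imp ne_of_lt) (h2.imp ne_of_lt)
    (by ext z; simp [hm])

-- the z-range filter is any pairwise-increasing list with the right membership
lemma filter_range_eq (bound : Int) (Q : Int → Bool) (X : List Int) (hX : X.Pairwise (· < ·))
    (hmem : ∀ z, ((1 ≤ z ∧ z ≤ bound) ∧ Q z = true) ↔ z ∈ X) :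
    (PySem.List.pyRange 1 (bound + 1) 1).filter Q = X := by
  refine sorted_ext ((PySem.List.pairwise_lt_pyRange_one 1 (bound + 1)).filter Q) hX ?_
  intro z
  rw [List.mem_filter, PySem.List.mem_pyRange_one, ← hmem z]
  constructor
  · rintro ⟨⟨u1, u2⟩, u3⟩; exact ⟨⟨u1, by omega⟩, u3⟩
  · rintro ⟨⟨u1, u2⟩, u3⟩; exact ⟨⟨u1, by omega⟩, u3⟩

-- the candidate-root step of B's inner loop (defeq to the lambda in points_brute_alt)
def stepB (x y bound q : Int) (st : List (Int × Int × Int) × Option Int) (t : Int) :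
    List (Int × Int × Int) × Option Int :=
  if PySem.Int.mod t q = 0 then
    let z := PySem.Int.floordiv t q
    if (1 ≤ z ∧ z ≤ bound) ∧ st.2 ≠ some z then (st.1 ++ [(x, y, z)], some z)
    else st
  else st

lemma stepB_nodvd (x y bound q : Int) (st : List (Int × Int × Int) × Option Int) (t : Int)
    (h : ¬ PySem.Int.mod t q = 0) : stepB x y bound q st t = st := by
  unfold stepB; rw [if_neg h]

lemma stepB_skip (x y bound q : Int) (st : List (Int × Int × Int) × Option Int) (t : Int)
    (h : PySem.Int.mod t q = 0)
    (h2 : ¬ ((1 ≤ PySem.Int.floordiv t q ∧ PySem.Int.floordiv t q ≤ bound) ∧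
      st.2 ≠ some (PySem.Int.floordiv t q))) : stepB x y bound q st t = st := by
  unfold stepB; rw [if_pos h]; dsimp only; rw [if_neg h2]

lemma stepB_app (x y bound q : Int) (st : List (Int × Int × Int) × Option Int) (t : Int)
    (h : PySem.Int.mod t q = 0)
    (h2 : (1 ≤ PySem.Int.floordiv t q ∧ PySem.Int.floordiv t q ≤ bound) ∧
      st.2 ≠ some (PySem.Int.floordiv t q)) :
    stepB x y bound q st t =
      (st.1 ++ [(x, y, PySem.Int.floordiv t q)], some (PySem.Int.floordiv t q)) := by
  unfold stepB; rw [if_pos h]; dsimp only; rw [if_pos h2]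

-- B's two-candidate loop equals A's filtered z-scan, given the root characterization of Q
lemma two_root_fold (bound x y q n1 n2 : Int) (hq : q ≠ 0)
    (hord : (0 < q ∧ n1 ≤ n2) ∨ (q < 0 ∧ n2 ≤ n1))
    (Q : Int → Bool) (hQ : ∀ z, Q z = true ↔ (q * z = n1 ∨ q * z = n2))
    (acc : List (Int × Int × Int)) :
    acc ++ ((PySem.List.pyRange 1 (bound + 1) 1).filter Q).map (fun z => (x, y, z))
    = ([n1, n2].foldl (stepB x y bound q) (acc, (none : Option Int))).1 := by
  simp only [List.foldl_cons, List.foldl_nil]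
  by_cases hd1 : PySem.Int.mod n1 q = 0
  · have hu' := PySem.Int.floordiv_mul_add_mod n1 q
    rw [hd1, add_zero] at hu'
    have hqu : q * PySem.Int.floordiv n1 q = n1 := by rw [mul_comm]; exact hu'
    have hiff1 : ∀ z, q * z = n1 ↔ z = PySem.Int.floordiv n1 q :=
      fun z => ⟨fun h => mul_left_cancel₀ hq (h.trans hqu.symm), fun h => by rw [h, hqu]⟩
    by_cases hr1 : 1 ≤ PySem.Int.floordiv n1 q ∧ PySem.Int.floordiv n1 q ≤ bound
    · rw [stepB_app x y bound q (acc, (none : Option Int)) n1 hd1 ⟨hr1, by simp⟩]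
      by_cases hd2 : PySem.Int.mod n2 q = 0
      · have hv' := PySem.Int.floordiv_mul_add_mod n2 q
        rw [hd2, add_zero] at hv'
        have hqv : q * PySem.Int.floordiv n2 q = n2 := by rw [mul_comm]; exact hv'
        have hiff2 : ∀ z, q * z = n2 ↔ z = PySem.Int.floordiv n2 q :=
          fun z => ⟨fun h => mul_left_cancel₀ hq (h.trans hqv.symm), fun h => by rw [h, hqv]⟩
        have huv : PySem.Int.floordiv n1 q ≤ PySem.Int.floordiv n2 q := by
          rcases hord with ⟨hqp, hn⟩ | ⟨hqn, hn⟩ <;> nlinarith [hqu, hqv]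
        by_cases hveq : PySem.Int.floordiv n2 q = PySem.Int.floordiv n1 q
        · rw [stepB_skip x y bound q _ n2 hd2 (by simp [hveq])]
          have hmemU0 : ∀ z, ((1 ≤ z ∧ z ≤ bound) ∧ Q z = true) ↔
              z ∈ [PySem.Int.floordiv n1 q] := by
            intro z
            constructor
            · rintro ⟨hzr, hQz⟩
              rcases (hQ z).mp hQz with h | h
              · have hz := (hiff1 z).mp h; subst hz; exact List.mem_singleton.mpr rfl
              · have hz := (hiff2 z).mp h; rw [hveq] at hz; subst hz
                exact List.mem_singleton.mpr rfl
            · intro hx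
              have hz := List.mem_singleton.mp hx; subst hz
              exact ⟨hr1, (hQ _).mpr (Or.inl ((hiff1 _).mpr rfl))⟩
          rw [filter_range_eq bound Q [PySem.Int.floordiv n1 q] (by simp) hmemU0]
          simp
        · by_cases hr2 : 1 ≤ PySem.Int.floordiv n2 q ∧ PySem.Int.floordiv n2 q ≤ bound
          · rw [stepB_app x y bound q _ n2 hd2 ⟨hr2, by simpa using Ne.symm hveq⟩]
            have hmemUV : ∀ z, ((1 ≤ z ∧ z ≤ bound) ∧ Q z = true) ↔
                z ∈ [PySem.Int.floordiv n1 q, PySem.Int.floordiv n2 q] := by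
              intro z
              constructor
              · rintro ⟨hzr, hQz⟩
                rcases (hQ z).mp hQz with h | h
                · have hz := (hiff1 z).mp h; subst hz; exact List.mem_cons_self
                · have hz := (hiff2 z).mp h; subst hz
                  exact List.mem_cons_of_mem _ (List.mem_singleton.mpr rfl)
              · intro hx
                rcases List.mem_cons.mp hx with hz | hx2
                · subst hz; exact ⟨hr1, (hQ _).mpr (Or.inl ((hiff1 _).mpr rfl))⟩
                · have hz := List.mem_singleton.mp hx2; subst hz
                  exact ⟨hr2, (hQ _).mpr (Or.inr ((hiff2 _).mpr rfl))⟩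
            rw [filter_range_eq bound Q [PySem.Int.floordiv n1 q, PySem.Int.floordiv n2 q]
              (by simp [lt_of_le_of_ne huv (fun h => hveq h.symm)]) hmemUV]
            simp
          · rw [stepB_skip x y bound q _ n2 hd2 (fun h => hr2 h.1)]
            have hmemU1 : ∀ z, ((1 ≤ z ∧ z ≤ bound) ∧ Q z = true) ↔
                z ∈ [PySem.Int.floordiv n1 q] := by
              intro z
              constructor
              · rintro ⟨hzr, hQz⟩
                rcases (hQ z).mp hQz with h | h
                · have hz := (hiff1 z).mp h; subst hz; exact List.mem_singleton.mpr rfl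
                · have hz := (hiff2 z).mp h; subst hz; exact absurd hzr hr2
              · intro hx
                have hz := List.mem_singleton.mp hx; subst hz
                exact ⟨hr1, (hQ _).mpr (Or.inl ((hiff1 _).mpr rfl))⟩
            rw [filter_range_eq bound Q [PySem.Int.floordiv n1 q] (by simp) hmemU1]
            simp
      · have hno2 : ∀ z, ¬ (q * z = n2) :=
          fun z h => hd2 ((PySem.Int.mod_eq_zero_iff_dvd n2 q).mpr ⟨z, h.symm⟩)
        rw [stepB_nodvd x y bound q _ n2 hd2]
        have hmemU2 : ∀ z, ((1 ≤ z ∧ z ≤ bound) ∧ Q z = true) ↔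
            z ∈ [PySem.Int.floordiv n1 q] := by
          intro z
          constructor
          · rintro ⟨hzr, hQz⟩
            rcases (hQ z).mp hQz with h | h
            · have hz := (hiff1 z).mp h; subst hz; exact List.mem_singleton.mpr rfl
            · exact absurd h (hno2 z)
          · intro hx
            have hz := List.mem_singleton.mp hx; subst hz
            exact ⟨hr1, (hQ _).mpr (Or.inl ((hiff1 _).mpr rfl))⟩
        rw [filter_range_eq bound Q [PySem.Int.floordiv n1 q] (by simp) hmemU2]
        simp
    · rw [stepB_skip x y bound q (acc, (none : Option Int)) n1 hd1 (fun h => hr1 h.1)]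
      by_cases hd2 : PySem.Int.mod n2 q = 0
      · have hv' := PySem.Int.floordiv_mul_add_mod n2 q
        rw [hd2, add_zero] at hv'
        have hqv : q * PySem.Int.floordiv n2 q = n2 := by rw [mul_comm]; exact hv'
        have hiff2 : ∀ z, q * z = n2 ↔ z = PySem.Int.floordiv n2 q :=
          fun z => ⟨fun h => mul_left_cancel₀ hq (h.trans hqv.symm), fun h => by rw [h, hqv]⟩
        by_cases hr2 : 1 ≤ PySem.Int.floordiv n2 q ∧ PySem.Int.floordiv n2 q ≤ bound
        · rw [stepB_app x y bound q (acc, (none : Option Int)) n2 hd2 ⟨hr2, by simp⟩]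
          have hmemV1 : ∀ z, ((1 ≤ z ∧ z ≤ bound) ∧ Q z = true) ↔
              z ∈ [PySem.Int.floordiv n2 q] := by
            intro z
            constructor
            · rintro ⟨hzr, hQz⟩
              rcases (hQ z).mp hQz with h | h
              · have hz := (hiff1 z).mp h; subst hz; exact absurd hzr hr1
              · have hz := (hiff2 z).mp h; subst hz; exact List.mem_singleton.mpr rfl
            · intro hx
              have hz := List.mem_singleton.mp hx; subst hz
              exact ⟨hr2, (hQ _).mpr (Or.inr ((hiff2 _).mpr rfl))⟩
          rw [filter_range_eq bound Q [PySem.Int.floordiv n2 q] (by simp) hmemV1]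
          simp
        · rw [stepB_skip x y bound q (acc, (none : Option Int)) n2 hd2 (fun h => hr2 h.1)]
          have hmemE1 : ∀ z, ((1 ≤ z ∧ z ≤ bound) ∧ Q z = true) ↔ z ∈ ([] : List Int) := by
            intro z
            constructor
            · rintro ⟨hzr, hQz⟩
              rcases (hQ z).mp hQz with h | h
              · have hz := (hiff1 z).mp h; subst hz; exact absurd hzr hr1
              · have hz := (hiff2 z).mp h; subst hz; exact absurd hzr hr2
            · intro hx
              exact absurd hx List.not_mem_nil
          rw [filter_range_eq bound Q [] (by simp) hmemE1]
          simp
      · have hno2 : ∀ z, ¬ (q * z = n2) :=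
          fun z h => hd2 ((PySem.Int.mod_eq_zero_iff_dvd n2 q).mpr ⟨z, h.symm⟩)
        rw [stepB_nodvd x y bound q _ n2 hd2]
        have hmemE2 : ∀ z, ((1 ≤ z ∧ z ≤ bound) ∧ Q z = true) ↔ z ∈ ([] : List Int) := by
          intro z
          constructor
          · rintro ⟨hzr, hQz⟩
            rcases (hQ z).mp hQz with h | h
            · have hz := (hiff1 z).mp h; subst hz; exact absurd hzr hr1
            · exact absurd h (hno2 z)
          · intro hx
            exact absurd hx List.not_mem_nil
        rw [filter_range_eq bound Q [] (by simp) hmemE2]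
        simp
  · have hno1 : ∀ z, ¬ (q * z = n1) :=
      fun z h => hd1 ((PySem.Int.mod_eq_zero_iff_dvd n1 q).mpr ⟨z, h.symm⟩)
    rw [stepB_nodvd x y bound q (acc, (none : Option Int)) n1 hd1]
    by_cases hd2 : PySem.Int.mod n2 q = 0
    · have hv' := PySem.Int.floordiv_mul_add_mod n2 q
      rw [hd2, add_zero] at hv'
      have hqv : q * PySem.Int.floordiv n2 q = n2 := by rw [mul_comm]; exact hv'
      have hiff2 : ∀ z, q * z = n2 ↔ z = PySem.Int.floordiv n2 q :=
        fun z => ⟨fun h => mul_left_cancel₀ hq (h.trans hqv.symm), fun h => by rw [h, hqv]⟩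
      by_cases hr2 : 1 ≤ PySem.Int.floordiv n2 q ∧ PySem.Int.floordiv n2 q ≤ bound
      · rw [stepB_app x y bound q (acc, (none : Option Int)) n2 hd2 ⟨hr2, by simp⟩]
        have hmemV2 : ∀ z, ((1 ≤ z ∧ z ≤ bound) ∧ Q z = true) ↔
            z ∈ [PySem.Int.floordiv n2 q] := by
          intro z
          constructor
          · rintro ⟨hzr, hQz⟩
            rcases (hQ z).mp hQz with h | h
            · exact absurd h (hno1 z)
            · have hz := (hiff2 z).mp h; subst hz; exact List.mem_singleton.mpr rfl
          · intro hx
            have hz := List.mem_singleton.mp hx; subst hz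
            exact ⟨hr2, (hQ _).mpr (Or.inr ((hiff2 _).mpr rfl))⟩
        rw [filter_range_eq bound Q [PySem.Int.floordiv n2 q] (by simp) hmemV2]
        simp
      · rw [stepB_skip x y bound q (acc, (none : Option Int)) n2 hd2 (fun h => hr2 h.1)]
        have hmemE3 : ∀ z, ((1 ≤ z ∧ z ≤ bound) ∧ Q z = true) ↔ z ∈ ([] : List Int) := by
          intro z
          constructor
          · rintro ⟨hzr, hQz⟩
            rcases (hQ z).mp hQz with h | h
            · exact absurd h (hno1 z)
            · have hz := (hiff2 z).mp h; subst hz; exact absurd hzr hr2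
          · intro hx
            exact absurd hx List.not_mem_nil
        rw [filter_range_eq bound Q [] (by simp) hmemE3]
        simp
    · have hno2 : ∀ z, ¬ (q * z = n2) :=
        fun z h => hd2 ((PySem.Int.mod_eq_zero_iff_dvd n2 q).mpr ⟨z, h.symm⟩)
      rw [stepB_nodvd x y bound q (acc, (none : Option Int)) n2 hd2]
      have hmemE4 : ∀ z, ((1 ≤ z ∧ z ≤ bound) ∧ Q z = true) ↔ z ∈ ([] : List Int) := by
        intro z
        constructor
        · rintro ⟨hzr, hQz⟩
          rcases (hQ z).mp hQz with h | h
          · exact absurd h (hno1 z)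
          · exact absurd h (hno2 z)
        · intro hx
          exact absurd hx List.not_mem_nil
      rw [filter_range_eq bound Q [] (by simp) hmemE4]
      simp

-- the per-(x,y) bodies of A and B agree (f = a*x^2+b*y^2-1 and p = d*x*y are abstract here)
lemma body_eq (bound c x y f p : Int) (acc : List (Int × Int × Int)) :
    (PySem.List.pyRange 1 (bound + 1) 1).foldl
      (fun acc z => if f + c * z * z - p * z = 0 then acc ++ [(x, y, z)] else acc) acc
    =
    (if c = 0 then
      if p = 0 then
        if f = 0 then
          (PySem.List.pyRange 1 (bound + 1) 1).foldl (fun acc z => acc ++ [(x, y, z)]) acc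
        else acc
      else if PySem.Int.mod f p = 0 then
        if 1 ≤ PySem.Int.floordiv f p ∧ PySem.Int.floordiv f p ≤ bound then
          acc ++ [(x, y, PySem.Int.floordiv f p)]
        else acc
      else acc
    else
      if 0 ≤ p * p - 4 * c * f then
        if isqrtP (p * p - 4 * c * f) * isqrtP (p * p - 4 * c * f) = p * p - 4 * c * f then
          ((if 0 < 2 * c then
              [p - isqrtP (p * p - 4 * c * f), p + isqrtP (p * p - 4 * c * f)]
            else
              [p + isqrtP (p * p - 4 * c * f), p - isqrtP (p * p - 4 * c * f)]).foldl
            (stepB x y bound (2 * c)) (acc, (none : Option Int))).1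
        else acc
      else acc) := by
  have hfun : (fun (acc : List (Int × Int × Int)) z =>
        if f + c * z * z - p * z = 0 then acc ++ [(x, y, z)] else acc)
      = (fun acc z => if (fun z => decide (f + c * z * z - p * z = 0)) z = true
          then acc ++ [(fun z : Int => (x, y, z)) z] else acc) := by
    funext acc z; simp
  rw [hfun, PySem.List.foldl_append_if]
  have hQ_iff : ∀ z, (fun z => decide (f + c * z * z - p * z = 0)) z = true ↔
      (f + c * z * z - p * z = 0) := by
    intro z; simp
  have key : ∀ z, f + c * z * z - p * z = 0 →
      (2 * c * z - p) * (2 * c * z - p) = p * p - 4 * c * f := by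
    intro z h
    linear_combination (4 * c) * h
  by_cases hc0 : c = 0
  · rw [if_pos hc0]
    have hQ0 : ∀ z, (fun z => decide (f + c * z * z - p * z = 0)) z = true ↔ p * z = f := by
      intro z; rw [hQ_iff z, hc0]; constructor <;> intro h <;> nlinarith [h]
    by_cases hp0 : p = 0
    · rw [if_pos hp0]
      by_cases hf0 : f = 0
      · rw [if_pos hf0]
        rw [List.filter_eq_self.mpr (fun z _ => (hQ0 z).mpr (by rw [hp0, hf0]; ring))]
        rw [PySem.List.foldl_append_singleton_eq_map]
      · rw [if_neg hf0]
        rw [List.filter_eq_nil_iff.mpr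
          (fun z _ hQz => hf0 (by have h := (hQ0 z).mp hQz; rw [hp0] at h; linarith))]
        simp
    · rw [if_neg hp0]
      by_cases hd : PySem.Int.mod f p = 0
      · rw [if_pos hd]
        have hu' := PySem.Int.floordiv_mul_add_mod f p
        rw [hd, add_zero] at hu'
        have hpu : p * PySem.Int.floordiv f p = f := by rw [mul_comm]; exact hu'
        have hiff : ∀ z, (fun z => decide (f + c * z * z - p * z = 0)) z = true ↔
            z = PySem.Int.floordiv f p := fun z => by
          rw [hQ0 z]
          exact ⟨fun h => mul_left_cancel₀ hp0 (h.trans hpu.symm), fun h => by rw [h, hpu]⟩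
        by_cases hr : 1 ≤ PySem.Int.floordiv f p ∧ PySem.Int.floordiv f p ≤ bound
        · rw [if_pos hr]
          have hmemB1 : ∀ z, ((1 ≤ z ∧ z ≤ bound) ∧
              (fun z => decide (f + c * z * z - p * z = 0)) z = true) ↔
              z ∈ [PySem.Int.floordiv f p] := by
            intro z
            constructor
            · rintro ⟨hzr, hQz⟩
              have hz := (hiff z).mp hQz; subst hz
              exact List.mem_singleton.mpr rfl
            · intro hx
              have hz := List.mem_singleton.mp hx; subst hz
              exact ⟨hr, (hiff _).mpr rfl⟩
          rw [filter_range_eq bound _ [PySem.Int.floordiv f p] (by simp) hmemB1]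
          simp
        · rw [if_neg hr]
          have hmemB2 : ∀ z, ((1 ≤ z ∧ z ≤ bound) ∧
              (fun z => decide (f + c * z * z - p * z = 0)) z = true) ↔
              z ∈ ([] : List Int) := by
            intro z
            constructor
            · rintro ⟨hzr, hQz⟩
              have hz := (hiff z).mp hQz; subst hz
              exact absurd hzr hr
            · intro hx
              exact absurd hx List.not_mem_nil
          rw [filter_range_eq bound _ [] (by simp) hmemB2]
          simp
      · rw [if_neg hd]
        have hno : ∀ z, ¬ (p * z = f) :=
          fun z h => hd ((PySem.Int.mod_eq_zero_iff_dvd f p).mpr ⟨z, h.symm⟩)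
        have hmemB3 : ∀ z, ((1 ≤ z ∧ z ≤ bound) ∧
            (fun z => decide (f + c * z * z - p * z = 0)) z = true) ↔
            z ∈ ([] : List Int) := by
          intro z
          constructor
          · rintro ⟨hzr, hQz⟩
            exact absurd ((hQ0 z).mp hQz) (hno z)
          · intro hx
            exact absurd hx List.not_mem_nil
        rw [filter_range_eq bound _ [] (by simp) hmemB3]
        simp
  · rw [if_neg hc0]
    by_cases hdn : 0 ≤ p * p - 4 * c * f
    · rw [if_pos hdn]
      by_cases hsq : isqrtP (p * p - 4 * c * f) * isqrtP (p * p - 4 * c * f) = p * p - 4 * c * f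
      · rw [if_pos hsq]
        have hs0 : 0 ≤ isqrtP (p * p - 4 * c * f) :=
          (isqrtP_spec (p * p - 4 * c * f).toNat (p * p - 4 * c * f) le_rfl hdn).1
        have hchar : ∀ z, (fun z => decide (f + c * z * z - p * z = 0)) z = true ↔
            (2 * c * z = p - isqrtP (p * p - 4 * c * f) ∨
             2 * c * z = p + isqrtP (p * p - 4 * c * f)) := by
          intro z
          rw [hQ_iff z]
          constructor
          · intro h
            have h2 : (2 * c * z - p) * (2 * c * z - p) =
                isqrtP (p * p - 4 * c * f) * isqrtP (p * p - 4 * c * f) :=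
              (key z h).trans hsq.symm
            rcases mul_self_eq_mul_self_iff.mp h2 with h3 | h3
            · right; linarith
            · left; linarith
          · intro h
            rcases h with h' | h'
            · have h4 : (4 * c) * (f + c * z * z - p * z) = 0 := by
                linear_combination (2 * c * z - p - isqrtP (p * p - 4 * c * f)) * h' + hsq
              rcases mul_eq_zero.mp h4 with h5 | h5
              · exact absurd h5 (by intro h6; apply hc0; omega)
              · exact h5
            · have h4 : (4 * c) * (f + c * z * z - p * z) = 0 := by
                linear_combination (2 * c * z - p + isqrtP (p * p - 4 * c * f)) * h' + hsq
              rcases mul_eq_zero.mp h4 with h5 | h5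
              · exact absurd h5 (by intro h6; apply hc0; omega)
              · exact h5
        by_cases hqp : 0 < 2 * c
        · rw [if_pos hqp]
          exact two_root_fold bound x y (2 * c) (p - isqrtP (p * p - 4 * c * f))
            (p + isqrtP (p * p - 4 * c * f)) (by omega) (Or.inl ⟨hqp, by omega⟩) _
            (fun z => by rw [hchar z]) acc
        · rw [if_neg hqp]
          exact two_root_fold bound x y (2 * c) (p + isqrtP (p * p - 4 * c * f))
            (p - isqrtP (p * p - 4 * c * f)) (by omega) (Or.inr ⟨by omega, by omega⟩) _
            (fun z => by rw [hchar z]; tauto) acc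
      · rw [if_neg hsq]
        rw [List.filter_eq_nil_iff.mpr (fun z _ hQz => by
          apply hsq
          have h := (hQ_iff z).mp hQz
          have ht := key z h
          rw [← ht, isqrtP_mul_self, abs_mul_abs_self, ht])]
        simp
    · rw [if_neg hdn]
      rw [List.filter_eq_nil_iff.mpr (fun z _ hQz => by
        apply hdn
        have h := (hQ_iff z).mp hQz
        have ht := key z h
        nlinarith [mul_self_nonneg (2 * c * z - p)])]
      simp

-- ===== VERDICT (by name: the statement is the Claim_ definition above) =====
theorem points_brute_spec : Claim_equal_points_brute := by
  intro bound a b c d _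
  unfold Spec_points_brute points_brute points_brute_alt
  congr 1
  funext acc x
  congr 1
  funext acc y
  exact body_eq bound c x y (a * x * x + b * y * y - 1) (d * x * y) acc
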